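-- pv_equiv track=rewrite | github.com/0x6N/Project-Election | project/gamma.py | build_forced_pairs
-- ===== SOURCE A (Python) =====
-- def build_forced_pairs(parent):
--     children = [[] for _ in parent]
--     for v, p in enumerate(parent):
--         if p is not None: children[p].append(v)
--     forced = set()
--     def dfs(u, anc):
--         forced.add((anc, u))
--         for w in children[u]: dfs(w, anc)
--     for a in range(len(parent)):
--         for ch in children[a]:
--             dfs(ch, a)
--     return forced
-- ===== SOURCE B (Python) =====
-- def build_forced_pairs(parent):
--     n = len(parent)
--     children = [[] for _ in range(n)]
--     for v in range(n):
--         p = parent[v]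
--         if p is not None:
--             children[p].append(v)
--     forced = set()
--     for a in range(n):
--         stack = []
--         stack.extend(reversed(children[a]))
--         while stack:
--             u = stack.pop()
--             forced.add((a, u))
--             stack.extend(reversed(children[u]))
--     return forced
-- ===== Notes on version B (the rewrite author's own statement) =====
-- stated objective: alternative
-- what changed: Replaces A's per-anchor recursive dfs closure with an iterative explicit-stack DFS (append/pop loop pushing reversed child lists), eliminating recursion entirely while emitting the pairs in the same preorder.
import Mathlib
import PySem

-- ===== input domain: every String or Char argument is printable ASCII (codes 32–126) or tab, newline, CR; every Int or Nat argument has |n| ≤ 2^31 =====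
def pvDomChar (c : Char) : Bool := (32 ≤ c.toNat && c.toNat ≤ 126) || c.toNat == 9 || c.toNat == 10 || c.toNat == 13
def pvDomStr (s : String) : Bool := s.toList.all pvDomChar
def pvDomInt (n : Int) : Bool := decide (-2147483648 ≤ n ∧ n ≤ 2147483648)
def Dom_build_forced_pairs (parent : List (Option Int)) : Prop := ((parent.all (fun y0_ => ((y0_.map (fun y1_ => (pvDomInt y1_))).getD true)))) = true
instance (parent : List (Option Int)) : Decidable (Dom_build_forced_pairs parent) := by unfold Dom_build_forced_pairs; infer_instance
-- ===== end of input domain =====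

-- B replaces A's per-anchor recursive DFS by an iterative explicit-stack DFS (alternative decomposition, same cost).

-- ===== PORT A =====
-- children[p].append(v)  (negative p wraps, exactly as Python list indexing; out of range excluded by Pre_)
def pvAppendChild (children : List (List Int)) (p : Int) (v : Int) : List (List Int) :=
  PySem.List.pySetD children p (PySem.List.pyGetD children p [] ++ [v])

-- children = [[] for _ in parent]; for v, p in enumerate(parent): if p is not None: children[p].append(v)
def pvChildren (parent : List (Option Int)) : List (List Int) :=
  (PySem.List.enumerate parent).foldl
    (fun ch vp => match vp.2 with
      | some p => pvAppendChild ch p vp.1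
      | none => ch)
    (List.replicate parent.length [])

-- def dfs(u, anc): forced.add((anc, u)); for w in children[u]: dfs(w, anc)
-- fuel is only a totality device: under Pre_ the recursion depth is below parent.length.
def pvDfsA (children : List (List Int)) (anc : Int) : Nat → Int → List (Int × Int) → List (Int × Int)
  | 0, _, forced => forced
  | fuel+1, u, forced =>
      (PySem.List.pyGetD children u []).foldl
        (fun f w => pvDfsA children anc fuel w f)
        (PySem.Set.add forced (anc, u))

def build_forced_pairs (parent : List (Option Int)) : List (Int × Int) :=
  let children := pvChildren parent
  (PySem.List.pyRange 0 (PySem.List.len parent) 1).foldl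
    (fun forced a =>
      (PySem.List.pyGetD children a []).foldl
        (fun f ch => pvDfsA children a parent.length ch f) forced)
    PySem.Set.empty

-- ===== PORT B =====
-- the while-loop of Source B; the Python end-stack (extend(reversed(cs)) then pop() from the end)
-- is represented with its top at the HEAD, where those two operations are exactly 'cs ++ stack'
-- and popping the head — the popped elements and their order are identical.
-- Each stack entry carries a fuel bound (totality device only; never exhausted under Pre_).
def pvStackBound (children : List (List Int)) : Nat := (children.map List.length).sum + 1

def pvLoopB (children : List (List Int)) (a : Int) :
    List (Nat × Int) → List (Int × Int) → List (Int × Int)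
  | [], forced => forced
  | (0, _) :: rest, forced => pvLoopB children a rest forced
  | (fuel+1, u) :: rest, forced =>
      pvLoopB children a
        ((PySem.List.pyGetD children u []).map (fun w => (fuel, w)) ++ rest)
        (PySem.Set.add forced (a, u))
  termination_by todo _ => (todo.map (fun e => (pvStackBound children) ^ e.1)).sum
  decreasing_by
  · simp only [List.map_cons, List.sum_cons, pow_zero]
    omega
  · have hB : 0 < pvStackBound children ^ fuel := Nat.pow_pos (Nat.succ_pos _)
    have hb : (PySem.List.pyGetD children u []).length ≤ (children.map List.length).sum := by
      by_cases h : PySem.Raise.InRange children.length u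
      · exact List.le_sum_of_mem (List.mem_map_of_mem (PySem.List.pyGetD_mem children [] h))
      · rw [PySem.List.pyGetD_of_none children u [] ((PySem.List.pyGet?_eq_none_iff children u).mpr h)]
        simp
    have key : (PySem.List.pyGetD children u []).length * pvStackBound children ^ fuel
        < pvStackBound children ^ (fuel + 1) :=
      calc (PySem.List.pyGetD children u []).length * pvStackBound children ^ fuel
          ≤ (children.map List.length).sum * pvStackBound children ^ fuel :=
            Nat.mul_le_mul_right _ hb
        _ < ((children.map List.length).sum + 1) * pvStackBound children ^ fuel :=
            (Nat.mul_lt_mul_right hB).mpr (Nat.lt_succ_self _)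
        _ = pvStackBound children ^ (fuel + 1) := by
            simp [pvStackBound, pow_succ, Nat.mul_comm]
    simp only [List.map_append, List.map_map, List.sum_append, List.map_cons, List.sum_cons,
      Function.comp_def, List.map_const', List.sum_replicate, smul_eq_mul, Nat.succ_eq_add_one]
    omega

def build_forced_pairs_alt (parent : List (Option Int)) : List (Int × Int) :=
  let children := pvChildren parent
  (PySem.List.pyRange 0 (PySem.List.len parent) 1).foldl
    (fun forced a =>
      pvLoopB children a
        ((PySem.List.pyGetD children a []).map (fun w => (parent.length, w)))
        forced)
    PySem.Set.empty

-- ===== PRECONDITION & SPEC =====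
-- Pre_ = exactly the inputs where Python A returns: every non-None parent entry is an
-- in-range index (else children[p].append raises IndexError), and the parent map is
-- acyclic — stated in closed form as: the parent.length-th iterate of the one-step
-- parent map sends every node to none (a root has been reached). On a parent cycle
-- A's dfs recurses forever.
def pvParentStep (parent : List (Option Int)) : Option Nat → Option Nat
  | none => none
  | some v =>
      match parent.getD v none with
      | none => none
      | some q => some ((if q < 0 then q + (parent.length : Int) else q).toNat)

def Pre_build_forced_pairs (parent : List (Option Int)) : Prop :=
  (parent.all (fun p => p.all (fun q =>
      decide (-(parent.length : Int) ≤ q ∧ q < (parent.length : Int)))) = true) ∧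
  (∀ v < parent.length, (pvParentStep parent)^[parent.length] (some v) = none)
instance (parent : List (Option Int)) : Decidable (Pre_build_forced_pairs parent) := by
  unfold Pre_build_forced_pairs; infer_instance

def pvWitness_build_forced_pairs : List (Option Int) := [none, some 0, some 0, some 2]

def Spec_build_forced_pairs (parent : List (Option Int)) (out : List (Int × Int)) : Prop := out = build_forced_pairs_alt parent
instance (parent : List (Option Int)) (out : List (Int × Int)) : Decidable (Spec_build_forced_pairs parent out) := by unfold Spec_build_forced_pairs; infer_instance

-- ===== CLAIM (what is proved, stated in full; the proofs are below) =====
def Claim_equal_build_forced_pairs : Prop := ∀ (parent : List (Option Int)), Dom_build_forced_pairs parent → Pre_build_forced_pairs parent → Spec_build_forced_pairs parent (build_forced_pairs parent)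

-- ===== LEMMAS AND PROOFS =====

-- the explicit-stack loop folds the recursive dfs over the stacked entries (exact, all fuels)
theorem pvLoopB_eq_foldl (children : List (List Int)) (a : Int) :
    ∀ todo forced, pvLoopB children a todo forced
      = todo.foldl (fun f e => pvDfsA children a e.1 e.2 f) forced := by
  intro todo forced
  fun_induction pvLoopB children a todo forced with
  | case1 forced => simp
  | case2 u rest forced ih =>
      simp only [List.foldl_cons, pvDfsA]
      exact ih
  | case3 fuel u rest forced ih =>
      rw [ih, List.foldl_append, List.foldl_map, List.foldl_cons]
      simp only [pvDfsA]

theorem build_forced_pairs_spec : Claim_equal_build_forced_pairs := by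
  intro parent _ _
  unfold Spec_build_forced_pairs build_forced_pairs build_forced_pairs_alt
  simp only [pvLoopB_eq_foldl, List.foldl_map]
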